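-- pv_equiv track=rewrite | github.com/mbauer83/assisted-architecture-management | src/infrastructure/mcp/artifact_mcp/bulk/diagram_refs.py | toposort_entities
-- ===== SOURCE A (Python) =====
-- def toposort_entities(entity_ids: set[str], grf_refs: dict[str, list[str]]) -> list[str]:
--     deps: dict[str, set[str]] = {entity_id: set() for entity_id in entity_ids}
--     for target, gar_ids in grf_refs.items():
--         if target not in entity_ids:
--             continue
--         for gar_id in gar_ids:
--             if gar_id in entity_ids:
--                 deps[target].add(gar_id)
--
--     ordered: list[str] = []
--     remaining = {entity_id: set(blockers) for entity_id, blockers in deps.items()}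
--     while remaining:
--         ready = sorted(entity_id for entity_id, blockers in remaining.items() if not blockers)
--         if not ready:
--             cycle = ", ".join(sorted(remaining))
--             raise ValueError(
--                 "Cannot resolve entity delete order because of cyclic inter-entity dependencies: "
--                 f"{cycle}"
--             )
--         for entity_id in ready:
--             ordered.append(entity_id)
--             remaining.pop(entity_id)
--         for blockers in remaining.values():
--             blockers.difference_update(ready)
--     return ordered
-- ===== SOURCE B (Python) =====
-- def toposort_entities(entity_ids: set[str], grf_refs: dict[str, list[str]]) -> list[str]:
--     indeg = {e: 0 for e in entity_ids}
--     succ = {e: [] for e in entity_ids}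
--     edges = [
--         (target, gar_id)
--         for target, gar_ids in grf_refs.items()
--         if target in indeg
--         for gar_id in gar_ids
--         if gar_id in indeg
--     ]
--     for target, gar_id in edges:
--         succ[gar_id].append(target)
--         indeg[target] += 1
--
--     order: list[str] = []
--     layer = sorted(e for e, d in indeg.items() if d == 0)
--     while layer:
--         order.extend(layer)
--         nxt: list[str] = []
--         for u in layer:
--             for t in succ[u]:
--                 indeg[t] -= 1
--                 if indeg[t] == 0:
--                     nxt.append(t)
--         layer = sorted(nxt)
--
--     if len(order) < len(indeg):
--         cycle = ", ".join(sorted(set(indeg) - set(order)))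
--         raise ValueError(
--             "Cannot resolve entity delete order because of cyclic inter-entity dependencies: "
--             f"{cycle}"
--         )
--     return order
-- ===== Notes on version B (the rewrite author's own statement) =====
-- stated objective: faster
-- what changed: Replaces A's per-round rescan of all remaining entities and set-difference update of every remaining blocker set with a Kahn-style layered topological sort: a reverse-adjacency map and indegree counters built once, each dependency edge touched exactly once, and each sorted layer derived from the counters that hit zero.
import Mathlib
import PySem

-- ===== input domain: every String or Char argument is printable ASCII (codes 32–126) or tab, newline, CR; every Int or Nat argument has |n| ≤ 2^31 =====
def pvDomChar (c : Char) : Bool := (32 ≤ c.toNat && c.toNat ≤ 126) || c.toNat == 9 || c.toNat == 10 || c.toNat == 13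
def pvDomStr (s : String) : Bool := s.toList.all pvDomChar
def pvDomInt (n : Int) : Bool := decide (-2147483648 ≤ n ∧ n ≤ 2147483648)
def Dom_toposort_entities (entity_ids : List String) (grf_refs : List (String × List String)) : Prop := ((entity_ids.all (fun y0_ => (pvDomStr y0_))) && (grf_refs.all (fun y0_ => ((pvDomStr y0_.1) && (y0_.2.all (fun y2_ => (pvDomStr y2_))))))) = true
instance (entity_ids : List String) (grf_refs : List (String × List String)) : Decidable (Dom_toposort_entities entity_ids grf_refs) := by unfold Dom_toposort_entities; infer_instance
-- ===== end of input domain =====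

-- B replaces A's per-round rescan of every remaining entity (and the set-difference
-- update of every remaining blocker set) by a Kahn-style layered topological sort with
-- a reverse-adjacency map and indegree counters, so each dependency edge is touched once.

-- ===== PORT A =====
-- the while-loop of A; fuel = remaining.size bounds the number of rounds (each round
-- pops at least one key), so the port computes exactly what the Python loop computes
def toposortA_loop (fuel : Nat) (remaining : PySem.Dict String (PySem.Set String))
    (ordered : List String) : List String :=
  match fuel with
  | 0 => ordered
  | fuel + 1 =>
    if remaining.items.isEmpty then ordered
    else
      -- ready = sorted(e for e, blockers in remaining.items() if not blockers)
      let ready : List String :=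
        PySem.List.sorted ((remaining.items.filter (fun p => p.2.isEmpty)).map (fun p => p.1))
          (fun x => x) false
      if ready.isEmpty then ordered  -- Python: raise ValueError (cycle) — excluded by Pre_
      else
        let remaining1 := ready.foldl (fun d e => d.erase e) remaining
        let remaining2 := PySem.Dict.mk
          (remaining1.items.map (fun p => (p.1, PySem.Set.diff p.2 ready)))
        toposortA_loop fuel remaining2 (ordered ++ ready)

def toposort_entities (entity_ids : List String) (grf_refs : List (String × List String)) : List String :=
  -- deps = {entity_id: set() for entity_id in entity_ids}
  let deps0 : PySem.Dict String (PySem.Set String) :=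
    entity_ids.foldl (fun d e => d.insert e PySem.Set.empty) PySem.Dict.empty
  -- for target, gar_ids in grf_refs.items(): … deps[target].add(gar_id)
  let deps : PySem.Dict String (PySem.Set String) :=
    grf_refs.foldl (fun d p =>
      if entity_ids.contains p.1 then
        p.2.foldl (fun d g =>
          if entity_ids.contains g then d.modify p.1 PySem.Set.empty (fun s => s.add g) else d) d
      else d) deps0
  -- remaining = {entity_id: set(blockers) for entity_id, blockers in deps.items()}
  let remaining : PySem.Dict String (PySem.Set String) :=
    PySem.Dict.mk (deps.items.map (fun p => (p.1, PySem.Set.ofList p.2)))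
  toposortA_loop remaining.size remaining []

-- ===== PORT B =====
-- the while-loop of B; fuel = indeg.size bounds the number of rounds
def toposortB_loop (fuel : Nat) (succ : PySem.Dict String (List String))
    (indeg : PySem.Dict String Int) (order : List String) (layer : List String) : List String :=
  match fuel with
  | 0 => order
  | fuel + 1 =>
    if layer.isEmpty then order
    else
      let order1 := order ++ layer
      let st := layer.foldl (fun (st : PySem.Dict String Int × List String) u =>
          (succ.getD u []).foldl (fun st t =>
            let d := st.1.modify t 0 (fun v => v - 1)
            if d.getD t 0 == 0 then (d, st.2 ++ [t]) else (d, st.2)) st)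
        (indeg, ([] : List String))
      toposortB_loop fuel succ st.1 order1 (PySem.List.sorted st.2 (fun x => x) false)

def toposort_entities_alt (entity_ids : List String) (grf_refs : List (String × List String)) : List String :=
  -- indeg = {e: 0 for e in entity_ids}; succ = {e: [] for e in entity_ids}
  let indeg0 : PySem.Dict String Int :=
    entity_ids.foldl (fun d e => d.insert e 0) PySem.Dict.empty
  let succ0 : PySem.Dict String (List String) :=
    entity_ids.foldl (fun d e => d.insert e []) PySem.Dict.empty
  -- edges = [(target, gar_id) for target, gar_ids in grf_refs.items() if target in indeg
  --          for gar_id in gar_ids if gar_id in indeg]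
  let edges : List (String × String) :=
    grf_refs.flatMap (fun p =>
      if indeg0.contains p.1 then (p.2.filter (fun g => indeg0.contains g)).map (fun g => (p.1, g))
      else [])
  -- for target, gar_id in edges: succ[gar_id].append(target); indeg[target] += 1
  let sd := edges.foldl (fun (sd : PySem.Dict String (List String) × PySem.Dict String Int) e =>
      (sd.1.modify e.2 [] (fun l => l ++ [e.1]), sd.2.modify e.1 0 (fun v => v + 1))) (succ0, indeg0)
  -- layer = sorted(e for e, d in indeg.items() if d == 0)
  let layer0 := PySem.List.sorted ((sd.2.items.filter (fun p => p.2 == 0)).map (fun p => p.1))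
    (fun x => x) false
  -- Python raises ValueError after the loop when len(order) < len(indeg) (cycle) — excluded by Pre_
  toposortB_loop sd.2.size sd.1 sd.2 [] layer0

-- ===== PRECONDITION & SPEC =====
-- Pre_ excludes exactly the inputs on which A raises ValueError: those whose dependency
-- graph restricted to entity_ids has a cycle, i.e. some nonempty subset of the entities
-- in which every member references another member.
def Pre_toposort_entities (entity_ids : List String) (grf_refs : List (String × List String)) : Prop :=
  ∀ S ∈ (PySem.Set.ofList entity_ids).sublists,
    (∀ x ∈ S, ∃ g ∈ S, ∃ p ∈ grf_refs, p.1 = x ∧ g ∈ p.2) → S = []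
instance (entity_ids : List String) (grf_refs : List (String × List String)) :
    Decidable (Pre_toposort_entities entity_ids grf_refs) := by
  unfold Pre_toposort_entities; infer_instance

def pvWitness_toposort_entities : List String × (List (String × List String)) :=
  (["a", "b", "c"], [("b", ["a"]), ("c", ["a", "b", "x"])])

def Spec_toposort_entities (entity_ids : List String) (grf_refs : List (String × List String))
    (out : List String) : Prop := out = toposort_entities_alt entity_ids grf_refs
instance (entity_ids : List String) (grf_refs : List (String × List String)) (out : List String) :
    Decidable (Spec_toposort_entities entity_ids grf_refs out) := by
  unfold Spec_toposort_entities; infer_instance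

-- ===== CLAIM (what is proved, stated in full; the proofs are below) =====
def Claim_equal_toposort_entities : Prop := ∀ (entity_ids : List String) (grf_refs : List (String × List String)), Dom_toposort_entities entity_ids grf_refs → Pre_toposort_entities entity_ids grf_refs → Spec_toposort_entities entity_ids grf_refs (toposort_entities entity_ids grf_refs)

-- ===== LEMMAS AND PROOFS =====

-- The distinct entities (first occurrences) and the filtered dependency edges
-- (target, blocker), both restricted to entity_ids.
def pvIds (entity_ids : List String) : List String := PySem.Set.ofList entity_ids

def pvEdges (entity_ids : List String) (grf_refs : List (String × List String)) :
    List (String × String) :=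
  grf_refs.flatMap (fun p =>
    if entity_ids.contains p.1 then (p.2.filter (fun g => entity_ids.contains g)).map (fun g => (p.1, g))
    else [])

def pvDep (E : List (String × String)) (x : String) : List String :=
  (E.filter (fun e => e.1 == x)).map (fun e => e.2)

-- the (sorted) layer of entities ready once `done` are deleted
def pvLayer (ids : List String) (E : List (String × String)) (done : List String) : List String :=
  PySem.List.sorted
    (ids.filter (fun x => !done.contains x && (pvDep E x).all (fun g => done.contains g)))
    (fun x => x) false

-- the common mathematical skeleton of both loops: peel layers until one is empty
def pvPeel (ids : List String) (E : List (String × String)) : Nat → List String → List String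
  | 0, _ => []
  | fuel + 1, done =>
    let L := pvLayer ids E done
    if L.isEmpty then [] else L ++ pvPeel ids E fuel (done ++ L)


-- the count of filtered edges into x whose blocker is not yet deleted
def pvCnt (E : List (String × String)) (x : String) (done : List String) : Nat :=
  E.countP (fun e => e.1 == x && !done.contains e.2)

-- ---------- generic fold/list helpers ----------

theorem pv_foldl_pair {a b g : Type} (l : List a) (f : b → a → b) (gf : g → a → g) :
    ∀ (x : b) (y : g),
      l.foldl (fun sd e => (f sd.1 e, gf sd.2 e)) (x, y) = (l.foldl f x, l.foldl gf y) := by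
  induction l with
  | nil => intro x y; rfl
  | cons e t ih => intro x y; simpa using ih (f x e) (gf y e)

theorem pv_foldl_flatten {a b : Type} (l : List a) (gf : a → List String) (f : b → String → b) :
    ∀ (x : b), l.foldl (fun st u => (gf u).foldl f st) x = (l.flatMap gf).foldl f x := by
  induction l with
  | nil => intro x; rfl
  | cons e t ih => intro x; simp [List.flatMap_cons, List.foldl_append, ih]

theorem pv_foldl_nested {b : Type} (c : String → Bool) (f : b → String × String → b) :
    ∀ (l : List (String × List String)) (x : b),
      l.foldl (fun st p =>
        if c p.1 then p.2.foldl (fun st g => if c g then f st (p.1, g) else st) st else st) x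
      = (l.flatMap (fun p =>
          if c p.1 then (p.2.filter c).map (fun g => (p.1, g)) else [])).foldl f x := by
  intro l
  induction l with
  | nil => intro x; rfl
  | cons p t ih =>
    intro x
    simp only [List.foldl_cons, List.flatMap_cons, List.foldl_append, ih]
    congr 1
    by_cases hc : c p.1
    · simp only [hc, if_true, List.foldl_map, List.foldl_filter]
    · simp [hc]

theorem pv_countP_disjoint {a : Type} (p q : a → Bool) :
    ∀ (l : List a), (∀ e ∈ l, ¬(p e = true ∧ q e = true)) →
      l.countP (fun e => p e || q e) = l.countP p + l.countP q := by
  intro l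
  induction l with
  | nil => intro _; rfl
  | cons e t ih =>
    intro h
    have ht := ih (fun a ha => h a (List.mem_cons_of_mem e ha))
    have he := h e (List.mem_cons_self ..)
    simp only [List.countP_cons, ht]
    by_cases hp : p e = true <;> by_cases hq : q e = true <;>
      simp [hp, hq] at he ⊢ <;> omega

theorem pv_count_nodup (l : List String) (x : String) (h : l.Nodup) :
    l.count x = if x ∈ l then 1 else 0 := by
  by_cases hx : x ∈ l
  · simp [hx, List.count_eq_one_of_mem h hx]
  · simp [hx, List.count_eq_zero.mpr hx]

-- ---------- dictionary helpers ----------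

theorem pv_contains_iff {n : Type} (d : PySem.Dict String n) (x : String) :
    d.contains x = true ↔ x ∈ d.keys := by
  simp only [PySem.Dict.contains, PySem.Dict.keys, List.any_eq_true, List.mem_map]
  constructor
  · rintro ⟨p, hp, h⟩; exact ⟨p, hp, beq_iff_eq.mp h⟩
  · rintro ⟨p, hp, h⟩; exact ⟨p, hp, beq_iff_eq.mpr h⟩

theorem pv_getD_seed {n : Type} (c : n) (l : List String) :
    ∀ (d : PySem.Dict String n), (∀ y, d.getD y c = c) →
      ∀ x, (l.foldl (fun d e => d.insert e c) d).getD x c = c := by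
  induction l with
  | nil => intro d h x; exact h x
  | cons e t ih =>
    intro d h x
    refine ih _ (fun y => ?_) x
    rw [PySem.Dict.getD_insert]
    split
    · rfl
    · exact h y

theorem pv_getD_empty {n : Type} (c : n) (x : String) :
    (PySem.Dict.empty : PySem.Dict String n).getD x c = c := rfl

theorem pv_keys_seed {n : Type} (c : n) (l : List String) :
    (l.foldl (fun d e => d.insert e c) PySem.Dict.empty).keys = PySem.Set.ofList l := by
  exact PySem.Dict.keys_foldl_insert l (fun _ _ => c) PySem.Dict.empty

theorem pv_contains_seed {n : Type} (c : n) (l : List String) (x : String) :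
    (l.foldl (fun d e => d.insert e c) PySem.Dict.empty).contains x = l.contains x := by
  rw [Bool.eq_iff_iff, pv_contains_iff, pv_keys_seed, PySem.Set.mem_ofList,
    List.contains_eq_mem, decide_eq_true_iff]

theorem pv_update_of_subset : ∀ (l : List String) (s : PySem.Set String),
    (∀ x ∈ l, x ∈ s) → PySem.Set.update s l = s := by
  intro l
  induction l with
  | nil => intro s _; rfl
  | cons e t ih =>
    intro s h
    have hc : s.contains e = true := (PySem.Set.contains_iff s e).mpr (h e List.mem_cons_self)
    have he : s.add e = s := by
      show (if s.contains e = true then s else s ++ [e]) = s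
      exact if_pos hc
    show PySem.Set.update (s.add e) t = s
    rw [he]
    exact ih s (fun x hx => h x (List.mem_cons_of_mem e hx))

theorem pv_erase_fold_items {n : Type} :
    ∀ (ks : List String) (d : PySem.Dict String n),
      (ks.foldl (fun d k => d.erase k) d).items = d.items.filter (fun p => !ks.contains p.1) := by
  intro ks
  induction ks with
  | nil => intro d; simp
  | cons k t ih =>
    intro d
    rw [List.foldl_cons, ih]
    have herase : (d.erase k).items = d.items.filter (fun p => !(p.1 == k)) := rfl
    rw [herase, List.filter_filter]
    exact List.filter_congr (fun p _ => by
      by_cases h1 : p.1 = k <;> by_cases h2 : p.1 ∈ t <;> simp [h1, h2])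

theorem pv_mem_getD_adds :
    ∀ (l : List (String × String)) (d : PySem.Dict String (PySem.Set String)) (x g : String),
      g ∈ (l.foldl (fun d e => d.modify e.1 PySem.Set.empty (fun s => s.add e.2)) d).getD x
            PySem.Set.empty
        ↔ g ∈ d.getD x PySem.Set.empty ∨ (x, g) ∈ l := by
  intro l
  induction l with
  | nil => intro d x g; simp
  | cons e t ih =>
    intro d x g
    rw [List.foldl_cons, ih]
    show _ ∨ _ ↔ _
    have hmod : (d.modify e.1 PySem.Set.empty (fun s => s.add e.2)).getD x PySem.Set.empty
        = if x = e.1 then (d.getD e.1 PySem.Set.empty).add e.2 else d.getD x PySem.Set.empty := by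
      rw [PySem.Dict.modify, PySem.Dict.getD_insert]
    rw [hmod]
    by_cases hx : x = e.1
    · subst hx
      rw [if_pos rfl]
      simp only [PySem.Set.mem_add, List.mem_cons, Prod.ext_iff]
      tauto
    · rw [if_neg hx]
      simp only [List.mem_cons, Prod.ext_iff]
      tauto

-- ---------- edges / deps / layers ----------

theorem pv_edges_mem (entity_ids : List String) (grf_refs : List (String × List String)) :
    ∀ e ∈ pvEdges entity_ids grf_refs, e.1 ∈ entity_ids ∧ e.2 ∈ entity_ids := by
  intro e he
  simp only [pvEdges, List.mem_flatMap] at he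
  obtain ⟨p, _, he⟩ := he
  split at he
  · rename_i hc
    simp only [List.mem_map, List.mem_filter] at he
    obtain ⟨g, ⟨_, hg⟩, rfl⟩ := he
    rw [List.contains_eq_mem, decide_eq_true_iff] at hc hg
    exact ⟨hc, hg⟩
  · simp at he

theorem pv_mem_pvDep (E : List (String × String)) (x g : String) :
    g ∈ pvDep E x ↔ (x, g) ∈ E := by
  simp only [pvDep, List.mem_map, List.mem_filter, beq_iff_eq]
  constructor
  · rintro ⟨e, ⟨he, rfl⟩, rfl⟩; rwa [show (e.1, e.2) = e from rfl]
  · intro h; exact ⟨(x, g), ⟨h, rfl⟩, rfl⟩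

theorem pv_cnt_zero_iff (E : List (String × String)) (x : String) (done : List String) :
    pvCnt E x done = 0 ↔ ∀ g ∈ pvDep E x, g ∈ done := by
  simp only [pvCnt, List.countP_eq_zero, Bool.and_eq_true, beq_iff_eq, Bool.not_eq_eq_eq_not,
    Bool.not_true, List.contains_eq_mem, decide_eq_false_iff_not, not_and]
  constructor
  · intro h g hg
    rw [pv_mem_pvDep] at hg
    by_contra hgd
    exact (h (x, g) hg rfl) hgd
  · intro h e he hex hnd
    refine hnd (h e.2 ((pv_mem_pvDep E x e.2).mpr ?_))
    rw [← hex, Prod.mk.eta]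
    exact he

theorem pv_mem_pvLayer (ids : List String) (E : List (String × String)) (done : List String)
    (x : String) :
    x ∈ pvLayer ids E done ↔ x ∈ ids ∧ x ∉ done ∧ ∀ g ∈ pvDep E x, g ∈ done := by
  simp [pvLayer, PySem.List.mem_sorted, List.mem_filter, List.all_eq_true,
    List.contains_eq_mem]

theorem pv_nodup_pvLayer (ids : List String) (E : List (String × String)) (done : List String)
    (h : ids.Nodup) : (pvLayer ids E done).Nodup := by
  exact (PySem.List.sorted_perm _ _ _).nodup_iff.mpr (h.filter _)

-- ---------- A side ----------

def pvInvA (ids : List String) (E : List (String × String)) (done : List String)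
    (remaining : PySem.Dict String (PySem.Set String)) : Prop :=
  remaining.keys.Nodup ∧
  (∀ x, x ∈ remaining.keys ↔ x ∈ ids ∧ x ∉ done) ∧
  (∀ p ∈ remaining.items, ∀ g, g ∈ p.2 ↔ (p.1, g) ∈ E ∧ g ∉ done)

theorem pv_ready_eq (ids : List String) (E : List (String × String)) (done : List String)
    (remaining : PySem.Dict String (PySem.Set String)) (hids : ids.Nodup)
    (h : pvInvA ids E done remaining) :
    PySem.List.sorted ((remaining.items.filter (fun p => p.2.isEmpty)).map (fun p => p.1))
        (fun x => x) false = pvLayer ids E done := by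
  obtain ⟨hnd, hkeys, hval⟩ := h
  unfold pvLayer
  apply PySem.List.sorted_eq_sorted_of_perm _ _ _ (fun a b hab => hab)
  have hnd1 : ((remaining.items.filter (fun p => p.2.isEmpty)).map (fun p => p.1)).Nodup := by
    have hsub : ((remaining.items.filter (fun p => p.2.isEmpty)).map (fun p => p.1)).Sublist
        remaining.keys := List.Sublist.map _ List.filter_sublist
    exact hsub.nodup hnd
  rw [List.perm_ext_iff_of_nodup hnd1 (hids.filter _)]
  intro a
  simp only [List.mem_map, List.mem_filter, List.isEmpty_iff, Bool.and_eq_true,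
    Bool.not_eq_eq_eq_not, Bool.not_true, List.contains_eq_mem, decide_eq_false_iff_not,
    List.all_eq_true, decide_eq_true_iff]
  constructor
  · rintro ⟨p, ⟨hp, hpe⟩, rfl⟩
    have hk : p.1 ∈ remaining.keys := List.mem_map_of_mem hp
    obtain ⟨hin, hnotdone⟩ := (hkeys p.1).mp hk
    refine ⟨hin, hnotdone, ?_⟩
    intro g hg
    by_contra hgd
    have hgv := (hval p hp g).mpr ⟨(pv_mem_pvDep E p.1 g).mp hg, hgd⟩
    rw [hpe] at hgv
    exact absurd hgv (List.not_mem_nil)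
  · rintro ⟨hin, hnd', hdeps⟩
    have hk : a ∈ remaining.keys := (hkeys a).mpr ⟨hin, hnd'⟩
    simp only [PySem.Dict.keys, List.mem_map] at hk
    obtain ⟨p, hp, hpa⟩ := hk
    refine ⟨p, ⟨hp, ?_⟩, hpa⟩
    rw [List.eq_nil_iff_forall_not_mem]
    intro g hg
    obtain ⟨hmem, hgd⟩ := (hval p hp g).mp hg
    exact hgd (hdeps g ((pv_mem_pvDep E a g).mpr (hpa ▸ hmem)))

theorem pv_invA_step (ids : List String) (E : List (String × String)) (done : List String)
    (remaining : PySem.Dict String (PySem.Set String)) (h : pvInvA ids E done remaining) :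
    pvInvA ids E (done ++ pvLayer ids E done)
      (PySem.Dict.mk
        ((((pvLayer ids E done).foldl (fun d e => d.erase e) remaining).items).map
          (fun p => (p.1, PySem.Set.diff p.2 (pvLayer ids E done))))) := by
  obtain ⟨hnd, hkeys, hval⟩ := h
  have hitems : ((pvLayer ids E done).foldl (fun d e => d.erase e) remaining).items
      = remaining.items.filter (fun p => !(pvLayer ids E done).contains p.1) :=
    pv_erase_fold_items (pvLayer ids E done) remaining
  have hkeys2 : (PySem.Dict.mk
      (((((pvLayer ids E done).foldl (fun d e => d.erase e) remaining)).items).map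
        (fun p => (p.1, PySem.Set.diff p.2 (pvLayer ids E done))))).keys
      = (remaining.items.filter (fun p => !(pvLayer ids E done).contains p.1)).map
          (fun p => p.1) := by
    simp only [PySem.Dict.keys, hitems, List.map_map]
    rfl
  refine ⟨?_, ?_, ?_⟩
  · rw [hkeys2]
    have hsub : ((remaining.items.filter (fun p => !(pvLayer ids E done).contains p.1)).map
        (fun p => p.1)).Sublist remaining.keys := List.Sublist.map _ List.filter_sublist
    exact hsub.nodup hnd
  · intro x
    rw [hkeys2]
    simp only [List.mem_map, List.mem_filter, Bool.not_eq_eq_eq_not, Bool.not_true,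
      List.contains_eq_mem, decide_eq_false_iff_not, List.mem_append]
    constructor
    · rintro ⟨p, ⟨hp, hpl⟩, rfl⟩
      obtain ⟨hin, hnotdone⟩ := (hkeys p.1).mp (List.mem_map_of_mem hp)
      exact ⟨hin, fun hor => hor.elim hnotdone hpl⟩
    · rintro ⟨hin, hnot⟩
      have hk : x ∈ remaining.keys := (hkeys x).mpr ⟨hin, fun hd => hnot (Or.inl hd)⟩
      simp only [PySem.Dict.keys, List.mem_map] at hk
      obtain ⟨p, hp, hpa⟩ := hk
      exact ⟨p, ⟨hp, hpa ▸ fun hl => hnot (Or.inr hl)⟩, hpa⟩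
  · intro p hp g
    simp only [hitems] at hp
    simp only [List.mem_map] at hp
    obtain ⟨q, hq, rfl⟩ := hp
    have hq' := List.mem_filter.mp hq
    have hv := hval q hq'.1 g
    simp only [PySem.Set.diff, PySem.Set.contains, List.mem_filter, Bool.not_eq_eq_eq_not,
      Bool.not_true, List.contains_eq_mem, decide_eq_false_iff_not, List.mem_append]
    rw [hv]
    constructor
    · rintro ⟨⟨hE, hd⟩, hl⟩
      exact ⟨hE, fun hor => hor.elim hd hl⟩
    · rintro ⟨hE, hnot⟩
      exact ⟨⟨hE, fun hd => hnot (Or.inl hd)⟩, fun hl => hnot (Or.inr hl)⟩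

theorem pv_Aloop (ids : List String) (E : List (String × String)) (hids : ids.Nodup) :
    ∀ (fuel : Nat) (remaining : PySem.Dict String (PySem.Set String))
      (ordered done : List String), pvInvA ids E done remaining →
      toposortA_loop fuel remaining ordered = ordered ++ pvPeel ids E fuel done := by
  intro fuel
  induction fuel with
  | zero => intro remaining ordered done _; simp [toposortA_loop, pvPeel]
  | succ fuel ih =>
    intro remaining ordered done h
    have hready := pv_ready_eq ids E done remaining hids h
    obtain ⟨hnd, hkeys, hval⟩ := h
    by_cases hemp : remaining.items.isEmpty
    · have hlay : pvLayer ids E done = [] := by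
        rw [List.eq_nil_iff_forall_not_mem]
        intro x hx
        obtain ⟨hin, hnotdone, _⟩ := (pv_mem_pvLayer ids E done x).mp hx
        have hk : x ∈ remaining.keys := (hkeys x).mpr ⟨hin, hnotdone⟩
        rw [List.isEmpty_iff] at hemp
        simp [PySem.Dict.keys, hemp] at hk
      simp [toposortA_loop, hemp, pvPeel, hlay]
    · by_cases hrdy : pvLayer ids E done = []
      · simp [toposortA_loop, hemp, hready, pvPeel, hrdy]
      · have hstep := pv_invA_step ids E done remaining ⟨hnd, hkeys, hval⟩
        simp only [toposortA_loop, hemp, Bool.false_eq_true, if_false, hready,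
          List.isEmpty_iff, hrdy, pvPeel]
        rw [ih _ _ _ hstep]
        simp [List.append_assoc]

-- ---------- B side ----------

def pvInvB (ids : List String) (E : List (String × String)) (order layer : List String)
    (indeg : PySem.Dict String Int) : Prop :=
  layer = pvLayer ids E order ∧
  (∀ x, x ∉ order → x ∉ layer → indeg.getD x 0 = (pvCnt E x order : Int)) ∧
  (∀ x ∈ layer, indeg.getD x 0 = 0) ∧
  (∀ x ∈ order, ∀ g, (x, g) ∈ E → g ∈ order) ∧
  order.Nodup ∧ (∀ x ∈ order, x ∈ ids)

theorem pv_decfold :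
    ∀ (ts : List String) (d : PySem.Dict String Int) (nxt : List String),
      (∀ x, (ts.foldl (fun st t =>
          let d := st.1.modify t 0 (fun v => v - 1)
          if d.getD t 0 == 0 then (d, st.2 ++ [t]) else (d, st.2)) (d, nxt)).1.getD x 0
        = d.getD x 0 - (ts.count x : Int)) ∧
      (∀ x, ((ts.foldl (fun st t =>
          let d := st.1.modify t 0 (fun v => v - 1)
          if d.getD t 0 == 0 then (d, st.2 ++ [t]) else (d, st.2)) (d, nxt)).2).count x
        = nxt.count x +
          (if 1 ≤ d.getD x 0 ∧ d.getD x 0 ≤ (ts.count x : Int) then 1 else 0)) := by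
  intro ts
  induction ts with
  | nil =>
    intro d nxt
    refine ⟨fun x => by simp, fun x => ?_⟩
    simp only [List.foldl_nil, List.count_nil, Nat.cast_zero]
    split_ifs with h
    · exact absurd (le_trans h.1 h.2) (by norm_num)
    · simp
  | cons t rest ih =>
    intro d nxt
    have hget : ∀ x, (d.modify t 0 (fun v => v - 1)).getD x 0
        = if x = t then d.getD t 0 - 1 else d.getD x 0 := fun x => by
      show (d.insert t (d.getD t 0 - 1)).getD x 0 = _
      rw [PySem.Dict.getD_insert]
    by_cases hc : d.getD t 0 = 1
    · have hcond : (((d.modify t 0 (fun v => v - 1)).getD t 0) == 0) = true := by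
        rw [hget, if_pos rfl]
        simp [hc]
      have hfold : List.foldl (fun (st : PySem.Dict String Int × List String) t =>
            let d := st.1.modify t 0 (fun v => v - 1)
            if d.getD t 0 == 0 then (d, st.2 ++ [t]) else (d, st.2)) (d, nxt) (t :: rest)
          = List.foldl (fun (st : PySem.Dict String Int × List String) t =>
            let d := st.1.modify t 0 (fun v => v - 1)
            if d.getD t 0 == 0 then (d, st.2 ++ [t]) else (d, st.2))
            (d.modify t 0 (fun v => v - 1), nxt ++ [t]) rest := by
        rw [List.foldl_cons]
        show List.foldl _ (if ((d.modify t 0 (fun v => v - 1)).getD t 0 == 0) = true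
            then (d.modify t 0 (fun v => v - 1), nxt ++ [t])
            else (d.modify t 0 (fun v => v - 1), nxt)) rest = _
        rw [if_pos hcond]
      constructor
      · intro x
        rw [hfold,
          (ih (d.modify t 0 (fun v => v - 1)) (nxt ++ [t])).1 x, hget x, List.count_cons]
        simp only [beq_iff_eq]
        split_ifs <;> (try subst_vars) <;> first | (push_cast; omega) | tauto
      · intro x
        rw [hfold,
          (ih (d.modify t 0 (fun v => v - 1)) (nxt ++ [t])).2 x,
          List.count_append, List.count_singleton, List.count_cons]
        simp only [hget, beq_iff_eq]
        split_ifs <;> (try subst_vars) <;> first | (push_cast; omega) | tauto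
    · have hcond : (((d.modify t 0 (fun v => v - 1)).getD t 0) == 0) = false := by
        rw [hget, if_pos rfl, beq_eq_false_iff_ne]
        omega
      have hfold : List.foldl (fun (st : PySem.Dict String Int × List String) t =>
            let d := st.1.modify t 0 (fun v => v - 1)
            if d.getD t 0 == 0 then (d, st.2 ++ [t]) else (d, st.2)) (d, nxt) (t :: rest)
          = List.foldl (fun (st : PySem.Dict String Int × List String) t =>
            let d := st.1.modify t 0 (fun v => v - 1)
            if d.getD t 0 == 0 then (d, st.2 ++ [t]) else (d, st.2))
            (d.modify t 0 (fun v => v - 1), nxt) rest := by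
        rw [List.foldl_cons]
        show List.foldl _ (if ((d.modify t 0 (fun v => v - 1)).getD t 0 == 0) = true
            then (d.modify t 0 (fun v => v - 1), nxt ++ [t])
            else (d.modify t 0 (fun v => v - 1), nxt)) rest = _
        have hcond' : ¬(((d.modify t 0 (fun v => v - 1)).getD t 0 == 0) = true) := by
          rw [hcond]; exact Bool.false_ne_true
        rw [if_neg hcond']
      constructor
      · intro x
        rw [hfold,
          (ih (d.modify t 0 (fun v => v - 1)) nxt).1 x, hget x, List.count_cons]
        simp only [beq_iff_eq]
        split_ifs <;> (try subst_vars) <;> first | (push_cast; omega) | tauto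
      · intro x
        rw [hfold,
          (ih (d.modify t 0 (fun v => v - 1)) nxt).2 x, List.count_cons]
        simp only [hget, beq_iff_eq]
        split_ifs <;> (try subst_vars) <;> first | (push_cast; omega) | tauto

theorem pv_count_ts (E : List (String × String)) (x : String) :
    ∀ (layer : List String), layer.Nodup →
      (layer.flatMap (fun u => (E.filter (fun e => e.2 == u)).map (fun e => e.1))).count x
        = E.countP (fun e => e.1 == x && layer.contains e.2) := by
  intro layer
  induction layer with
  | nil =>
    intro _
    simp
  | cons u us ih =>
    intro hnd
    obtain ⟨hu, hus⟩ := List.nodup_cons.mp hnd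
    rw [List.flatMap_cons, List.count_append, ih hus]
    have h1 : ((E.filter (fun e => e.2 == u)).map (fun e => e.1)).count x
        = E.countP (fun e => e.1 == x && e.2 == u) := by
      rw [List.count_eq_countP, List.countP_map, List.countP_filter]
      apply List.countP_congr
      intro e _
      simp [Function.comp]
    rw [h1]
    have hdis : E.countP (fun e => (e.1 == x && e.2 == u) || (e.1 == x && us.contains e.2))
        = E.countP (fun e => e.1 == x && e.2 == u)
          + E.countP (fun e => e.1 == x && us.contains e.2) := by
      apply pv_countP_disjoint
      intro e _ ⟨h1', h2'⟩
      simp only [Bool.and_eq_true, beq_iff_eq] at h1' h2'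
      rw [List.contains_eq_mem, decide_eq_true_iff] at h2'
      exact hu (h1'.2 ▸ h2'.2)
    rw [← hdis]
    apply List.countP_congr
    intro e _
    rw [List.contains_cons, Bool.and_or_distrib_left]

theorem pv_invB_step (ids : List String) (E : List (String × String))
    (hids : ids.Nodup) (hE : ∀ e ∈ E, e.1 ∈ ids ∧ e.2 ∈ ids)
    (order layer : List String) (indeg : PySem.Dict String Int)
    (h : pvInvB ids E order layer indeg) :
    pvInvB ids E (order ++ layer)
      (PySem.List.sorted
        ((layer.flatMap (fun u => (E.filter (fun e => e.2 == u)).map (fun e => e.1))).foldl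
          (fun st t =>
            let d := st.1.modify t 0 (fun v => v - 1)
            if d.getD t 0 == 0 then (d, st.2 ++ [t]) else (d, st.2)) (indeg, [])).2
        (fun x => x) false)
      ((layer.flatMap (fun u => (E.filter (fun e => e.2 == u)).map (fun e => e.1))).foldl
          (fun st t =>
            let d := st.1.modify t 0 (fun v => v - 1)
            if d.getD t 0 == 0 then (d, st.2 ++ [t]) else (d, st.2)) (indeg, [])).1 := by
  obtain ⟨hlayer, hcnt, hzero, hclosed, hnodup, hsub⟩ := h
  set ts := layer.flatMap (fun u => (E.filter (fun e => e.2 == u)).map (fun e => e.1)) with hts_def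
  have hdec := pv_decfold ts indeg []
  have hd1 := hdec.1
  have hd2 : ∀ x, ((ts.foldl (fun st t =>
      let d := st.1.modify t 0 (fun v => v - 1)
      if d.getD t 0 == 0 then (d, st.2 ++ [t]) else (d, st.2)) (indeg, ([] : List String))).2).count x
      = (if 1 ≤ indeg.getD x 0 ∧ indeg.getD x 0 ≤ (ts.count x : Int) then 1 else 0) := by
    intro x
    have := hdec.2 x
    simpa using this
  have hLnd : layer.Nodup := by
    rw [hlayer]; exact pv_nodup_pvLayer ids E order hids
  have hLmem : ∀ x ∈ layer, x ∈ ids ∧ x ∉ order ∧ ∀ g ∈ pvDep E x, g ∈ order := by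
    intro x hx
    exact (pv_mem_pvLayer ids E order x).mp (hlayer ▸ hx)
  have htsx : ∀ x, ts.count x = E.countP (fun e => e.1 == x && layer.contains e.2) :=
    fun x => pv_count_ts E x layer hLnd
  have hsplit : ∀ x, pvCnt E x order
      = E.countP (fun e => e.1 == x && layer.contains e.2) + pvCnt E x (order ++ layer) := by
    intro x
    unfold pvCnt
    rw [← pv_countP_disjoint (fun e => e.1 == x && layer.contains e.2)
      (fun e => e.1 == x && !(order ++ layer).contains e.2) E (by
        intro e _ ⟨hA, hB⟩
        simp only [Bool.and_eq_true, List.contains_eq_mem, decide_eq_true_iff,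
          Bool.not_eq_eq_eq_not, Bool.not_true, decide_eq_false_iff_not, List.mem_append] at hA hB
        exact hB.2 (Or.inr hA.2))]
    apply List.countP_congr
    intro e _
    by_cases h1 : e.1 = x
    · by_cases h2 : e.2 ∈ layer
      · have h3 : e.2 ∉ order := (hLmem e.2 h2).2.1
        simp [h1, h2, h3, List.contains_eq_mem, List.mem_append]
      · by_cases h3 : e.2 ∈ order <;>
          simp [h1, h2, h3, List.contains_eq_mem, List.mem_append]
    · simp [beq_iff_eq, h1]
  have he1 : ∀ x, pvCnt E x order = ts.count x + pvCnt E x (order ++ layer) := by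
    intro x; rw [hsplit x, htsx x]
  have hcond_iff : ∀ x, (1 ≤ indeg.getD x 0 ∧ indeg.getD x 0 ≤ (ts.count x : Int))
      ↔ (x ∈ ids ∧ x ∉ (order ++ layer) ∧ ∀ g ∈ pvDep E x, g ∈ order ++ layer) := by
    intro x
    by_cases hxo : x ∈ order
    · have h4 : ts.count x = 0 := by
        rw [htsx x, List.countP_eq_zero]
        intro e he hb
        simp only [Bool.and_eq_true, beq_iff_eq, List.contains_eq_mem, decide_eq_true_iff] at hb
        have hg : x ∈ order → e.2 ∈ order := fun hx =>
          hclosed x hx e.2 (by rw [← hb.1, Prod.mk.eta]; exact he)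
        exact (hLmem e.2 hb.2).2.1 (hg hxo)
      constructor
      · rintro ⟨ha, hb⟩
        rw [h4] at hb
        exfalso
        push_cast at hb
        omega
      · rintro ⟨_, hno, _⟩
        exact absurd (List.mem_append.mpr (Or.inl hxo)) hno
    · by_cases hxl : x ∈ layer
      · have h0 := hzero x hxl
        constructor
        · rintro ⟨ha, _⟩; rw [h0] at ha; exfalso; omega
        · rintro ⟨_, hno, _⟩; exact absurd (List.mem_append.mpr (Or.inr hxl)) hno
      · have hdeg : indeg.getD x 0 = (pvCnt E x order : Int) := hcnt x hxo hxl
        constructor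
        · rintro ⟨ha, hb⟩
          have hrest : pvCnt E x (order ++ layer) = 0 := by
            have he1x := he1 x
            rw [hdeg] at hb
            omega
          have hx_in_ids : x ∈ ids := by
            have hne : pvCnt E x order ≠ 0 := by
              rw [hdeg] at ha
              omega
            obtain ⟨e, he, hp⟩ : ∃ e ∈ E, (e.1 == x && !order.contains e.2) = true := by
              by_contra hcon
              refine hne (List.countP_eq_zero.mpr (fun a ha hpa => hcon ⟨a, ha, hpa⟩))
            simp only [Bool.and_eq_true, beq_iff_eq] at hp
            exact hp.1 ▸ (hE e he).1
          exact ⟨hx_in_ids, fun hmem => (List.mem_append.mp hmem).elim hxo hxl,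
            (pv_cnt_zero_iff E x (order ++ layer)).mp hrest⟩
        · rintro ⟨hxi, hno, hdeps⟩
          have hrest : pvCnt E x (order ++ layer) = 0 :=
            (pv_cnt_zero_iff E x (order ++ layer)).mpr hdeps
          have hpos : pvCnt E x order ≠ 0 := by
            intro h0
            have hxL : x ∈ pvLayer ids E order := (pv_mem_pvLayer ids E order x).mpr
              ⟨hxi, hxo, (pv_cnt_zero_iff E x order).mp h0⟩
            exact hxl (hlayer ▸ hxL)
          have he1x := he1 x
          rw [hdeg]
          constructor
          · omega
          · omega
  have hB1 : PySem.List.sorted ((ts.foldl (fun st t =>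
      let d := st.1.modify t 0 (fun v => v - 1)
      if d.getD t 0 == 0 then (d, st.2 ++ [t]) else (d, st.2)) (indeg, ([] : List String))).2)
        (fun x => x) false = pvLayer ids E (order ++ layer) := by
    unfold pvLayer
    apply PySem.List.sorted_eq_sorted_of_perm _ _ _ (fun a b hab => hab)
    rw [List.perm_iff_count]
    intro x
    rw [hd2 x, pv_count_nodup _ x (hids.filter _)]
    have hmemf : x ∈ ids.filter (fun y => !(order ++ layer).contains y
        && (pvDep E y).all (fun g => (order ++ layer).contains g))
        ↔ (x ∈ ids ∧ x ∉ (order ++ layer) ∧ ∀ g ∈ pvDep E x, g ∈ order ++ layer) := by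
      rw [← PySem.List.mem_sorted (xs := ids.filter _) (key := fun x => x) (rev := false)]
      exact pv_mem_pvLayer ids E (order ++ layer) x
    exact if_congr ((hcond_iff x).trans hmemf.symm) rfl rfl
  have hnewdeg : ∀ x, x ∉ (order ++ layer) → ((ts.foldl (fun st t =>
      let d := st.1.modify t 0 (fun v => v - 1)
      if d.getD t 0 == 0 then (d, st.2 ++ [t]) else (d, st.2)) (indeg, ([] : List String))).1).getD x 0
      = (pvCnt E x (order ++ layer) : Int) := by
    intro x hxo'
    have hxo : x ∉ order := fun hh => hxo' (List.mem_append.mpr (Or.inl hh))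
    have hxl : x ∉ layer := fun hh => hxo' (List.mem_append.mpr (Or.inr hh))
    rw [hd1 x, hcnt x hxo hxl]
    have he1x := he1 x
    omega
  refine ⟨hB1, ?_, ?_, ?_, ?_, ?_⟩
  · intro x hxo' _
    exact hnewdeg x hxo'
  · intro x hx
    rw [hB1] at hx
    obtain ⟨hxi, hxo', hdeps⟩ := (pv_mem_pvLayer ids E (order ++ layer) x).mp hx
    rw [hnewdeg x hxo', (pv_cnt_zero_iff E x (order ++ layer)).mpr hdeps]
    rfl
  · intro x hx g hg
    rcases List.mem_append.mp hx with hxo | hxl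
    · exact List.mem_append.mpr (Or.inl (hclosed x hxo g hg))
    · exact List.mem_append.mpr
        (Or.inl ((hLmem x hxl).2.2 g ((pv_mem_pvDep E x g).mpr hg)))
  · rw [List.nodup_append]
    refine ⟨hnodup, hLnd, ?_⟩
    intro a ha b hb hab
    exact (hLmem b hb).2.1 (hab ▸ ha)
  · intro x hx
    rcases List.mem_append.mp hx with hxo | hxl
    · exact hsub x hxo
    · exact (hLmem x hxl).1

theorem pv_Bloop (ids : List String) (E : List (String × String)) (hids : ids.Nodup)
    (hE : ∀ e ∈ E, e.1 ∈ ids ∧ e.2 ∈ ids) (succ : PySem.Dict String (List String))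
    (hsucc : ∀ u, succ.getD u [] = (E.filter (fun e => e.2 == u)).map (fun e => e.1)) :
    ∀ (fuel : Nat) (indeg : PySem.Dict String Int) (order layer : List String),
      pvInvB ids E order layer indeg →
      toposortB_loop fuel succ indeg order layer = order ++ pvPeel ids E fuel order := by
  intro fuel
  induction fuel with
  | zero => intro indeg order layer h; simp [toposortB_loop, pvPeel]
  | succ fuel ih =>
    intro indeg order layer h
    by_cases hemp : layer.isEmpty
    · have hl : pvLayer ids E order = [] := by rw [← h.1]; exact List.isEmpty_iff.mp hemp
      simp [toposortB_loop, hemp, pvPeel, hl]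
    · have hlf : (pvLayer ids E order).isEmpty = false := by
        rw [← h.1]; exact Bool.eq_false_iff.mpr hemp
      have hemp' : layer.isEmpty = false := Bool.eq_false_iff.mpr hemp
      simp only [toposortB_loop, hemp', Bool.false_eq_true, if_false]
      rw [pv_foldl_flatten layer (fun u => succ.getD u []) _ (indeg, [])]
      have hgf : layer.flatMap (fun u => succ.getD u [])
          = layer.flatMap (fun u => (E.filter (fun e => e.2 == u)).map (fun e => e.1)) := by
        simp only [hsucc]
      rw [hgf]
      have hstep := pv_invB_step ids E hids hE order layer indeg h
      rw [ih _ _ _ hstep]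
      simp only [pvPeel, hlf, Bool.false_eq_true, if_false]
      rw [← h.1, List.append_assoc]

theorem pv_A_eq_peel (entity_ids : List String) (grf_refs : List (String × List String)) :
    toposort_entities entity_ids grf_refs =
      pvPeel (pvIds entity_ids) (pvEdges entity_ids grf_refs) (pvIds entity_ids).length [] := by
  unfold toposort_entities
  have hdeps : (grf_refs.foldl (fun d p =>
      if entity_ids.contains p.1 then
        p.2.foldl (fun d g =>
          if entity_ids.contains g then d.modify p.1 PySem.Set.empty (fun s => s.add g) else d) d
      else d) (entity_ids.foldl (fun d e => d.insert e PySem.Set.empty) PySem.Dict.empty))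
      = (pvEdges entity_ids grf_refs).foldl
          (fun d e => d.modify e.1 PySem.Set.empty (fun s => s.add e.2))
          (entity_ids.foldl (fun d e => d.insert e PySem.Set.empty) PySem.Dict.empty) :=
    pv_foldl_nested (fun x => entity_ids.contains x)
      (fun (d : PySem.Dict String (PySem.Set String)) e =>
        d.modify e.1 PySem.Set.empty (fun s => s.add e.2)) grf_refs _
  simp only [hdeps]
  set seed : PySem.Dict String (PySem.Set String) :=
    entity_ids.foldl (fun d e => d.insert e PySem.Set.empty) PySem.Dict.empty with hseed
  set deps : PySem.Dict String (PySem.Set String) :=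
    (pvEdges entity_ids grf_refs).foldl
      (fun d e => d.modify e.1 PySem.Set.empty (fun s => s.add e.2)) seed with hdepsdef
  have hdkeys : deps.keys = pvIds entity_ids := by
    rw [hdepsdef]
    have h1 := PySem.Dict.keys_foldl_modify_key (pvEdges entity_ids grf_refs)
      (fun e => e.1) PySem.Set.empty (fun _ e s => s.add e.2) seed
    rw [h1, hseed, pv_keys_seed]
    exact pv_update_of_subset _ _ (fun x hx => by
      simp only [List.mem_map] at hx
      obtain ⟨e, he, rfl⟩ := hx
      rw [PySem.Set.mem_ofList]
      exact (pv_edges_mem entity_ids grf_refs e he).1)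
  have hdnodup : deps.keys.Nodup := by rw [hdkeys]; exact PySem.Set.nodup_ofList entity_ids
  have hdval : ∀ x g, g ∈ deps.getD x PySem.Set.empty ↔ (x, g) ∈ pvEdges entity_ids grf_refs := by
    intro x g
    rw [hdepsdef, pv_mem_getD_adds]
    have hseedv : seed.getD x PySem.Set.empty = PySem.Set.empty := by
      rw [hseed]
      exact pv_getD_seed PySem.Set.empty entity_ids PySem.Dict.empty
        (fun y => pv_getD_empty PySem.Set.empty y) x
    rw [hseedv]
    simp [PySem.Set.empty]
  have hditems : deps.items = deps.keys.map (fun k => (k, deps.getD k PySem.Set.empty)) :=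
    PySem.Dict.items_eq_map_keys deps hdnodup PySem.Set.empty
  have hinv : pvInvA (pvIds entity_ids) (pvEdges entity_ids grf_refs) []
      (PySem.Dict.mk (deps.items.map (fun p => (p.1, PySem.Set.ofList p.2)))) := by
    have hkmk : (PySem.Dict.mk (deps.items.map (fun p => (p.1, PySem.Set.ofList p.2)))).keys
        = deps.keys := by
      simp [PySem.Dict.keys, List.map_map, Function.comp]
    refine ⟨?_, ?_, ?_⟩
    · rw [hkmk]; exact hdnodup
    · intro x
      rw [hkmk, hdkeys]
      simp
    · intro p hp g
      rw [List.mem_map] at hp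
      obtain ⟨q, hq, rfl⟩ := hp
      rw [hditems, List.mem_map] at hq
      obtain ⟨k, _, rfl⟩ := hq
      simp only [PySem.Set.mem_ofList]
      rw [hdval k g]
      simp
  have hsize : (PySem.Dict.mk (deps.items.map (fun p => (p.1, PySem.Set.ofList p.2)))).size
      = (pvIds entity_ids).length := by
    show (deps.items.map _).length = _
    rw [List.length_map, ← hdkeys]
    simp [PySem.Dict.keys]
  rw [hsize]
  exact pv_Aloop (pvIds entity_ids) (pvEdges entity_ids grf_refs)
    (PySem.Set.nodup_ofList entity_ids) _ _ _ [] hinv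

theorem pv_B_eq_peel (entity_ids : List String) (grf_refs : List (String × List String)) :
    toposort_entities_alt entity_ids grf_refs =
      pvPeel (pvIds entity_ids) (pvEdges entity_ids grf_refs) (pvIds entity_ids).length [] := by
  unfold toposort_entities_alt
  have hedges : grf_refs.flatMap (fun p =>
      if (entity_ids.foldl (fun d e => d.insert e (0 : Int)) PySem.Dict.empty).contains p.1 then
        (p.2.filter (fun g =>
          (entity_ids.foldl (fun d e => d.insert e (0 : Int)) PySem.Dict.empty).contains g)).map
          (fun g => (p.1, g))
      else []) = pvEdges entity_ids grf_refs := by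
    unfold pvEdges
    simp only [pv_contains_seed]
  simp only [hedges]
  have hpair : (pvEdges entity_ids grf_refs).foldl
      (fun (sd : PySem.Dict String (List String) × PySem.Dict String Int) e =>
        (sd.1.modify e.2 [] (fun l => l ++ [e.1]), sd.2.modify e.1 0 (fun v => v + 1)))
      (entity_ids.foldl (fun d e => d.insert e ([] : List String)) PySem.Dict.empty,
        entity_ids.foldl (fun d e => d.insert e (0 : Int)) PySem.Dict.empty)
      = ((pvEdges entity_ids grf_refs).foldl
          (fun d e => d.modify e.2 [] (fun l => l ++ [e.1]))
          (entity_ids.foldl (fun d e => d.insert e ([] : List String)) PySem.Dict.empty),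
        (pvEdges entity_ids grf_refs).foldl
          (fun d e => d.modify e.1 0 (fun v => v + 1))
          (entity_ids.foldl (fun d e => d.insert e (0 : Int)) PySem.Dict.empty)) :=
    pv_foldl_pair (pvEdges entity_ids grf_refs)
      (fun (d : PySem.Dict String (List String)) (e : String × String) =>
        d.modify e.2 [] (fun l => l ++ [e.1]))
      (fun (d : PySem.Dict String Int) (e : String × String) =>
        d.modify e.1 0 (fun v => v + 1)) _ _
  simp only [hpair]
  set E := pvEdges entity_ids grf_refs with hE_def
  set succ := E.foldl (fun d e => d.modify e.2 [] (fun l => l ++ [e.1]))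
    (entity_ids.foldl (fun d e => d.insert e ([] : List String)) PySem.Dict.empty) with hsucc_def
  set indeg := E.foldl (fun d e => d.modify e.1 0 (fun v => v + 1))
    (entity_ids.foldl (fun d e => d.insert e (0 : Int)) PySem.Dict.empty) with hindeg_def
  have hE' : ∀ e ∈ E, e.1 ∈ pvIds entity_ids ∧ e.2 ∈ pvIds entity_ids := by
    intro e he
    obtain ⟨h1, h2⟩ := pv_edges_mem entity_ids grf_refs e he
    exact ⟨(PySem.Set.mem_ofList entity_ids e.1).mpr h1,
      (PySem.Set.mem_ofList entity_ids e.2).mpr h2⟩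
  have hsucc : ∀ u, succ.getD u [] = (E.filter (fun e => e.2 == u)).map (fun e => e.1) := by
    intro u
    have hmap : succ = ((E.map Prod.swap).foldl (fun d p => d.modify p.1 [] (fun l => l ++ [p.2]))
        (entity_ids.foldl (fun d e => d.insert e ([] : List String)) PySem.Dict.empty)) := by
      rw [hsucc_def, List.foldl_map]
      rfl
    rw [hmap, PySem.Dict.getD_foldl_modify_append]
    rw [pv_getD_seed ([] : List String) entity_ids PySem.Dict.empty
      (fun y => pv_getD_empty ([] : List String) y) u]
    rw [List.filter_map, List.map_map]
    simp only [List.nil_append]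
    apply congrArg
    apply List.filter_congr
    intro e _
    rfl
  have hdeg : ∀ x, indeg.getD x 0 = (pvCnt E x [] : Int) := by
    intro x
    have hmap : indeg = ((E.map (fun e => e.1)).foldl (fun d k => d.modify k 0 (fun v => v + 1))
        (entity_ids.foldl (fun d e => d.insert e (0 : Int)) PySem.Dict.empty)) := by
      rw [hindeg_def, List.foldl_map]
    rw [hmap, PySem.Dict.getD_foldl_modify_add_one]
    rw [pv_getD_seed (0 : Int) entity_ids PySem.Dict.empty
      (fun y => pv_getD_empty (0 : Int) y) x]
    have hcp : (E.map (fun e => e.1)).count x = pvCnt E x [] := by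
      unfold pvCnt
      rw [List.count_eq_countP, List.countP_map]
      apply List.countP_congr
      intro e _
      simp [Function.comp]
    rw [hcp]
    ring
  have hkeys : indeg.keys = pvIds entity_ids := by
    rw [hindeg_def]
    have h1 := PySem.Dict.keys_foldl_modify_key E (fun e => e.1) (0 : Int)
      (fun _ _ v => v + 1)
      (entity_ids.foldl (fun d e => d.insert e (0 : Int)) PySem.Dict.empty)
    rw [h1, pv_keys_seed]
    exact pv_update_of_subset _ _ (fun x hx => by
      simp only [List.mem_map] at hx
      obtain ⟨e, he, rfl⟩ := hx
      exact (hE' e he).1)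
  have hnodup : indeg.keys.Nodup := by
    rw [hkeys]; exact PySem.Set.nodup_ofList entity_ids
  have hitems : indeg.items = indeg.keys.map (fun k => (k, indeg.getD k 0)) :=
    PySem.Dict.items_eq_map_keys indeg hnodup 0
  have hlist : (indeg.items.filter (fun p => p.2 == 0)).map (fun p => p.1)
      = indeg.keys.filter (fun k => indeg.getD k 0 == 0) := by
    rw [hitems, List.filter_map, List.map_map]
    have h1 : ((fun (p : String × Int) => p.1) ∘ (fun k => (k, indeg.getD k 0))) = id := rfl
    have h2 : ((fun (p : String × Int) => p.2 == 0) ∘ (fun k => (k, indeg.getD k 0)))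
        = (fun k => indeg.getD k 0 == 0) := rfl
    rw [h1, h2, List.map_id]
  have hlay0 : PySem.List.sorted ((indeg.items.filter (fun p => p.2 == 0)).map (fun p => p.1))
      (fun x => x) false = pvLayer (pvIds entity_ids) E [] := by
    unfold pvLayer
    rw [hlist, hkeys]
    apply congrArg (fun l => PySem.List.sorted l (fun x => x) false)
    apply List.filter_congr
    intro k _
    rw [hdeg k]
    by_cases hd : pvDep E k = []
    · have h0 : pvCnt E k [] = 0 := (pv_cnt_zero_iff E k []).mpr (by
        rw [hd]; intro g hg; cases hg)
      rw [h0, hd]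
      simp
    · obtain ⟨g, hg⟩ := List.exists_mem_of_ne_nil _ hd
      have h0 : pvCnt E k [] ≠ 0 := fun h0 =>
        absurd ((pv_cnt_zero_iff E k []).mp h0 g hg) (List.not_mem_nil)
      have hA : (((pvCnt E k [] : Int)) == 0) = false := by
        rw [beq_eq_false_iff_ne]
        exact_mod_cast h0
      have hB : ((pvDep E k).all (fun g => ([] : List String).contains g)) = false := by
        rw [List.all_eq_false]
        exact ⟨g, hg, by simp⟩
      rw [hA, hB]
      simp
  have hinv0 : pvInvB (pvIds entity_ids) E [] (pvLayer (pvIds entity_ids) E []) indeg := by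
    refine ⟨rfl, ?_, ?_, ?_, List.nodup_nil, ?_⟩
    · intro x _ _
      exact hdeg x
    · intro x hx
      obtain ⟨_, _, hdeps⟩ := (pv_mem_pvLayer (pvIds entity_ids) E [] x).mp hx
      rw [hdeg x, (pv_cnt_zero_iff E x []).mpr hdeps]
      rfl
    · intro x hx
      exact absurd hx (List.not_mem_nil)
    · intro x hx
      exact absurd hx (List.not_mem_nil)
  have hsize : indeg.size = (pvIds entity_ids).length := by
    show indeg.items.length = _
    rw [← hkeys]
    simp [PySem.Dict.keys]
  rw [hlay0, hsize]
  have := pv_Bloop (pvIds entity_ids) E (PySem.Set.nodup_ofList entity_ids) hE' succ hsucc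
    (pvIds entity_ids).length indeg [] (pvLayer (pvIds entity_ids) E []) hinv0
  simpa using this

-- ===== VERDICT (by name: the statement is the Claim_ definition above) =====
theorem toposort_entities_spec : Claim_equal_toposort_entities := by
  intro entity_ids grf_refs _ _
  unfold Spec_toposort_entities
  rw [pv_A_eq_peel, pv_B_eq_peel]
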